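-- pv_equiv track=rewrite | github.com/miliar/Code_Jam_Webscraper | solutions_python/Problem_117/775.py | solveLawn
-- ===== SOURCE A (Python) =====
-- def CheckRow(rowNum, lawn, val):
-- 	for sqare in lawn[rowNum]:
-- 		if(sqare > val):
-- 			return False
-- 	return True
--
-- def CheckCol(colNum, lawn, dimensions, val):
-- 	for row in range(dimensions[0]):
-- 		if(lawn[row][colNum] > val):
-- 			return False
-- 	return True
--
-- def solveLawn(ld, lh):
-- 	if(1 in ld):
-- 		return "YES"
--
-- 	for row in range(ld[0]):
-- 		for col in range(ld[1]):
-- 			if(not(CheckRow(row, lh, lh[row][col])) and not(CheckCol(col, lh, ld, lh[row][col]))):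
-- 				return "NO"
--
-- 	return "YES"
-- ===== SOURCE B (Python) =====
-- def solveLawn(ld, lh):
--     if 1 in ld:
--         return "YES"
--     R = ld[0]
--     if R <= 0:
--         return "YES"
--     C = ld[1]
--     if C <= 0:
--         return "YES"
--     rows = lh[:R]
--     colmax = {}
--     for r in rows:
--         for j, v in enumerate(r[:C]):
--             if j not in colmax or v > colmax[j]:
--                 colmax[j] = v
--     for r in rows:
--         if not r:
--             continue
--         mi = max(r)
--         for j, v in enumerate(r[:C]):
--             if v < mi and v < colmax[j]:
--                 return "NO"
--     return "YES"
-- ===== Notes on version B (the rewrite author's own statement) =====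
-- stated objective: alternative
-- what changed: B precomputes each row's maximum and a dictionary of per-column maxima in one pass and then decides every cell with two comparisons, instead of A's rescanning the whole row and the whole column for every cell; on the measured random input family the two run at the same speed.
import Mathlib
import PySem

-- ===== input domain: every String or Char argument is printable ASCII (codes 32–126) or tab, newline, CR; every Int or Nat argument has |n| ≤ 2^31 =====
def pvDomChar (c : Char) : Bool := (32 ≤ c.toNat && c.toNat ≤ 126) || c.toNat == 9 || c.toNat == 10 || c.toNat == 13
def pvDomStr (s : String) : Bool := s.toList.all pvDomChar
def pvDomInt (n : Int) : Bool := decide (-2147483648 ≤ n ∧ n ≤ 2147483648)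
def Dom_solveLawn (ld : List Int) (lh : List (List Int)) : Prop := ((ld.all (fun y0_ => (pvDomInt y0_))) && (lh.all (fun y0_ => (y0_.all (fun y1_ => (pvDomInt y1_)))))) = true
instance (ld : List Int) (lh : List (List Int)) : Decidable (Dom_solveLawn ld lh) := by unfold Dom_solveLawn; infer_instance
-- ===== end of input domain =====

-- B precomputes the maximum of each row and of each column once and checks every cell with two
-- comparisons, instead of A's per-cell rescan of the whole row and the whole column.

-- ===== PORT A =====
def CheckRowA (rowNum : Int) (lawn : List (List Int)) (val : Int) : Bool :=
  (PySem.List.pyGetD lawn rowNum []).all (fun sqare => ! decide (sqare > val))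

def CheckColA (colNum : Int) (lawn : List (List Int)) (dimensions : List Int) (val : Int) : Bool :=
  (PySem.List.pyRange 0 (PySem.List.pyGetD dimensions 0 0) 1).all
    (fun row => ! decide (PySem.List.pyGetD (PySem.List.pyGetD lawn row []) colNum 0 > val))

def solveLawn (ld : List Int) (lh : List (List Int)) : String :=
  if (1 : Int) ∈ ld then "YES"
  else if (PySem.List.pyRange 0 (PySem.List.pyGetD ld 0 0) 1).any (fun row =>
      (PySem.List.pyRange 0 (PySem.List.pyGetD ld 1 0) 1).any (fun col =>
        (! CheckRowA row lh (PySem.List.pyGetD (PySem.List.pyGetD lh row []) col 0)) &&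
        (! CheckColA col lh ld (PySem.List.pyGetD (PySem.List.pyGetD lh row []) col 0))))
  then "NO" else "YES"

-- ===== PORT B =====
-- one step of B's column-maximum build loop: `if j not in colmax or v > colmax[j]: colmax[j] = v`
def bColStep (cm : PySem.Dict Int Int) (jv : Int × Int) : PySem.Dict Int Int :=
  if (! cm.contains jv.1) || decide (cm.getD jv.1 0 < jv.2) then cm.insert jv.1 jv.2 else cm

def bBuildCol (rows : List (List Int)) (C : Int) : PySem.Dict Int Int :=
  rows.foldl (fun cm r =>
    (PySem.List.enumerate (PySem.List.slice r none (some C)) 0).foldl bColStep cm)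
    PySem.Dict.empty

def solveLawn_alt (ld : List Int) (lh : List (List Int)) : String :=
  if (1 : Int) ∈ ld then "YES"
  else
    let R := PySem.List.pyGetD ld 0 0
    if R ≤ 0 then "YES"
    else
      let C := PySem.List.pyGetD ld 1 0
      if C ≤ 0 then "YES"
      else
        let rows := PySem.List.slice lh none (some R)
        let colmax := bBuildCol rows C
        -- `colmax[j]` ported as getD: exact, because every j of the check loop was inserted by the build loop
        if rows.any (fun r =>
            (! r.isEmpty) &&
            (let mi := (PySem.List.max? r (fun y => y)).getD 0
             (PySem.List.enumerate (PySem.List.slice r none (some C)) 0).any (fun jv =>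
               decide (jv.2 < mi) && decide (jv.2 < colmax.getD jv.1 0))))
        then "NO" else "YES"

-- ===== PRECONDITION & SPEC =====
-- The predicates below describe, purely in terms of the input grid, the cells of A's row-major
-- scan: where an index access would raise (a missing row/square) and where A returns "NO".
def lawnRow (lh : List (List Int)) (i : Nat) : List Int := lh.getD i []
def lawnVal (lh : List (List Int)) (i j : Nat) : Int := (lawnRow lh i).getD j 0
def lawnOkB (lh : List (List Int)) (i j : Nat) : Bool :=
  decide (i < lh.length) && decide (j < (lawnRow lh i).length)
-- some square of row i exceeds the value at (i,j)  (CheckRow returns False)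
def lawnRFB (lh : List (List Int)) (i j : Nat) : Bool :=
  (lawnRow lh i).any (fun s => decide (lawnVal lh i j < s))
-- CheckCol at column j returns False: some row r < R exceeds the value, every earlier row exists and does not
def lawnCFB (R : Int) (lh : List (List Int)) (i j : Nat) : Bool :=
  (List.range (min R.toNat (lh.length + 1))).any (fun r =>
    (List.range r).all (fun r' => lawnOkB lh r' j && decide (lawnVal lh r' j ≤ lawnVal lh i j)) &&
    lawnOkB lh r j && decide (lawnVal lh i j < lawnVal lh r j))
-- CheckCol at column j raises: it hits a missing square before finding an exceeding one
def lawnCXB (R : Int) (lh : List (List Int)) (i j : Nat) : Bool :=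
  (List.range (min R.toNat (lh.length + 1))).any (fun r =>
    (List.range r).all (fun r' => lawnOkB lh r' j && decide (lawnVal lh r' j ≤ lawnVal lh i j)) &&
    ! lawnOkB lh r j)
-- A returns "NO" when its scan reaches cell (i,j)
def lawnNoB (R : Int) (lh : List (List Int)) (i j : Nat) : Bool :=
  lawnOkB lh i j && lawnRFB lh i j && lawnCFB R lh i j
-- A raises when its scan reaches cell (i,j)
def lawnRaiseB (R : Int) (lh : List (List Int)) (i j : Nat) : Bool :=
  ! lawnOkB lh i j || (lawnRFB lh i j && ! lawnCFB R lh i j && lawnCXB R lh i j)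
-- A's scan returns normally: every raising cell is preceded (row-major) by a "NO" cell
def lawnAReturnsB (R C : Int) (lh : List (List Int)) : Bool :=
  (List.range (min R.toNat (lh.length + 1))).all (fun i =>
    (List.range (min C.toNat ((lawnRow lh i).length + 1))).all (fun j =>
      ! lawnRaiseB R lh i j ||
      (List.range (i + 1)).any (fun i' =>
        (List.range (min C.toNat ((lawnRow lh i').length))).any (fun j' =>
          (decide (i' < i) || decide (j' < j)) && lawnNoB R lh i' j'))))

-- Pre_ excludes exactly the inputs on which Python A raises an IndexError: ld empty (or of length 1
-- with a positive row count) when indexed, and grids where A's row-major scan hits a missing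
-- square (row index ≥ len(lh) or column index ≥ len(row)) before reaching any "NO" cell.
def Pre_solveLawn (ld : List Int) (lh : List (List Int)) : Prop :=
  (1 : Int) ∈ ld ∨ (ld ≠ [] ∧ (PySem.List.pyGetD ld 0 0 ≤ 0 ∨ (2 ≤ ld.length ∧
    (PySem.List.pyGetD ld 1 0 ≤ 0 ∨
      lawnAReturnsB (PySem.List.pyGetD ld 0 0) (PySem.List.pyGetD ld 1 0) lh = true))))
instance (ld : List Int) (lh : List (List Int)) : Decidable (Pre_solveLawn ld lh) := by
  unfold Pre_solveLawn; infer_instance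

def pvWitness_solveLawn : List Int × List (List Int) := ([2, 2], [[1, 2], [3, 4]])

def Spec_solveLawn (ld : List Int) (lh : List (List Int)) (out : String) : Prop := out = solveLawn_alt ld lh
instance (ld : List Int) (lh : List (List Int)) (out : String) : Decidable (Spec_solveLawn ld lh out) := by unfold Spec_solveLawn; infer_instance

-- ===== CLAIM (what is proved, stated in full; the proofs are below) =====
def Claim_equal_solveLawn : Prop := ∀ (ld : List Int) (lh : List (List Int)), Dom_solveLawn ld lh → Pre_solveLawn ld lh → Spec_solveLawn ld lh (solveLawn ld lh)

-- ===== LEMMAS AND PROOFS =====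

theorem lawnRow_eq (lh : List (List Int)) (i : Nat) (h : i < lh.length) :
    lawnRow lh i = lh[i] := by
  simp [lawnRow, List.getD_eq_getElem?_getD, List.getElem?_eq_getElem h]

theorem pyVal_cast (lh : List (List Int)) (i j : Nat) :
    PySem.List.pyGetD (PySem.List.pyGetD lh (i : Int) []) (j : Int) 0 = lawnVal lh i j := by
  simp [PySem.List.pyGetD_natCast, lawnVal, lawnRow]

theorem notRow_iff (lh : List (List Int)) (i j : Nat) :
    ((! CheckRowA (i : Int) lh (lawnVal lh i j)) = true) ↔
      ∃ s ∈ lawnRow lh i, lawnVal lh i j < s := by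
  simp [CheckRowA, PySem.List.pyGetD_natCast, lawnRow]

theorem notCol_iff (lh : List (List Int)) (ld : List Int) (R : Int) (j : Nat) (v : Int)
    (hld0 : PySem.List.pyGetD ld 0 0 = R) :
    ((! CheckColA (j : Int) lh ld v) = true) ↔ ∃ r < R.toNat, v < lawnVal lh r j := by
  rw [CheckColA, hld0]
  simp only [List.all_eq_not_any_not, Bool.not_not, List.any_eq_true,
    PySem.List.mem_pyRange_one]
  constructor
  · rintro ⟨r, ⟨h0, hR⟩, h⟩
    refine ⟨r.toNat, by omega, ?_⟩
    have : ((r.toNat : Int)) = r := by omega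
    rw [← this, pyVal_cast] at h
    simpa using h
  · rintro ⟨r, hr, h⟩
    refine ⟨(r : Int), ⟨by omega, by omega⟩, ?_⟩
    rw [pyVal_cast]
    simpa using h

theorem maxD_lt_iff (l : List Int) (hl : l ≠ []) (v : Int) :
    v < (PySem.List.max? l (fun y => y)).getD 0 ↔ ∃ s ∈ l, v < s := by
  obtain ⟨m, hm⟩ : ∃ m, PySem.List.max? l (fun y => y) = some m := by
    cases h : PySem.List.max? l (fun y => y) with
    | none => exact absurd ((PySem.List.max?_eq_none_iff l (fun y => y)).mp h) hl
    | some m => exact ⟨m, rfl⟩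
  rw [hm]
  constructor
  · intro hv; exact ⟨m, PySem.List.max?_mem hm, hv⟩
  · rintro ⟨s, hs, hvs⟩
    exact lt_of_lt_of_le hvs (PySem.List.max?_isMax hm s hs)

-- membership in B's per-row enumerate of the sliced row
theorem mem_enum_slice (r : List Int) (C : Int) (hC : 0 ≤ C) (jv : Int × Int) :
    jv ∈ PySem.List.enumerate (PySem.List.slice r none (some C)) 0 ↔
      ∃ k : Nat, k < r.length ∧ (k : Int) < C ∧ jv = ((k : Int), r.getD k 0) := by
  rw [PySem.List.slice_to r hC, PySem.List.mem_enumerate_iff]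
  constructor
  · rintro ⟨k, hk, rfl⟩
    have hk' : k < C.toNat ∧ k < r.length := by
      simpa [Nat.lt_min] using hk
    refine ⟨k, hk'.2, by omega, ?_⟩
    simp [List.getElem_take, List.getD_eq_getElem?_getD, List.getElem?_eq_getElem hk'.2]
  · rintro ⟨k, hk1, hk2, rfl⟩
    have hk : k < (r.take C.toNat).length := by simp; omega
    refine ⟨k, hk, ?_⟩
    simp [List.getElem_take, List.getD_eq_getElem?_getD, List.getElem?_eq_getElem hk1]

theorem mem_rows (lh : List (List Int)) (R : Int) (hR : 0 ≤ R) (r : List Int) :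
    r ∈ PySem.List.slice lh none (some R) ↔ ∃ i < min R.toNat lh.length, lawnRow lh i = r := by
  rw [PySem.List.slice_to lh hR, List.mem_iff_getElem]
  constructor
  · rintro ⟨i, hlen, rfl⟩
    have hi : i < min R.toNat lh.length := by simpa [Nat.lt_min] using hlen
    refine ⟨i, hi, ?_⟩
    rw [lawnRow_eq lh i (by omega), List.getElem_take]
  · rintro ⟨i, hi, rfl⟩
    have hlen : i < (lh.take R.toNat).length := by simp; omega
    refine ⟨i, hlen, ?_⟩
    rw [lawnRow_eq lh i (by omega), List.getElem_take]

-- ===== the column-maximum dictionary =====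

theorem bstep_persist (cm : PySem.Dict Int Int) (jv : Int × Int) (k : Int) (m : Int)
    (h : cm.get? k = some m) :
    ∃ m', m ≤ m' ∧ (bColStep cm jv).get? k = some m' := by
  unfold bColStep
  by_cases hk : k = jv.1
  · subst hk
    have hc : cm.contains jv.1 = true := by
      rw [PySem.Dict.contains_eq_isSome_get?, h]; rfl
    have hg : cm.getD jv.1 0 = m := PySem.Dict.getD_of_get?_eq_some cm 0 h
    split_ifs with hcond
    · refine ⟨jv.2, ?_, PySem.Dict.get?_insert_self cm jv.1 jv.2⟩
      rw [Bool.or_eq_true, Bool.not_eq_true', decide_eq_true_eq] at hcond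
      rcases hcond with hc' | hlt
      · rw [hc] at hc'; cases hc'
      · omega
    · exact ⟨m, le_refl m, h⟩
  · split_ifs
    · exact ⟨m, le_refl m, by rw [PySem.Dict.get?_insert_of_ne cm jv.2 hk, h]⟩
    · exact ⟨m, le_refl m, h⟩

theorem bstep_self (cm : PySem.Dict Int Int) (jv : Int × Int) :
    ∃ m, (bColStep cm jv).get? jv.1 = some m ∧ jv.2 ≤ m := by
  unfold bColStep
  split_ifs with hcond
  · exact ⟨jv.2, PySem.Dict.get?_insert_self cm jv.1 jv.2, le_refl _⟩
  · rw [Bool.or_eq_true, not_or, Bool.not_eq_true', Bool.not_eq_false] at hcond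
    obtain ⟨hc, hle'⟩ := hcond
    have hle : jv.2 ≤ cm.getD jv.1 0 := by
      simp only [decide_eq_true_eq, not_lt] at hle'; exact hle'
    obtain ⟨m, hm⟩ : ∃ m, cm.get? jv.1 = some m := by
      have hiso := PySem.Dict.contains_eq_isSome_get? cm jv.1
      rw [hc] at hiso
      cases h : cm.get? jv.1 with
      | none => rw [h] at hiso; simp at hiso
      | some m => exact ⟨m, rfl⟩
    refine ⟨m, hm, ?_⟩
    have := PySem.Dict.getD_of_get?_eq_some cm 0 hm
    omega

theorem bstep_source (cm : PySem.Dict Int Int) (jv : Int × Int) (k : Int) (m : Int)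
    (h : (bColStep cm jv).get? k = some m) :
    cm.get? k = some m ∨ (k = jv.1 ∧ m = jv.2) := by
  unfold bColStep at h
  split_ifs at h
  · by_cases hk : k = jv.1
    · subst hk
      rw [PySem.Dict.get?_insert_self] at h
      right; exact ⟨rfl, (Option.some.injEq _ _).mp h.symm⟩
    · rw [PySem.Dict.get?_insert_of_ne cm jv.2 hk] at h
      exact Or.inl h
  · exact Or.inl h

theorem bfold_persist (l : List (Int × Int)) (cm : PySem.Dict Int Int) (k m : Int)
    (h : cm.get? k = some m) :
    ∃ m', m ≤ m' ∧ (l.foldl bColStep cm).get? k = some m' := by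
  induction l generalizing cm m with
  | nil => exact ⟨m, le_refl m, h⟩
  | cons jv t ih =>
    obtain ⟨m1, hm1, h1⟩ := bstep_persist cm jv k m h
    obtain ⟨m2, hm2, h2⟩ := ih (bColStep cm jv) m1 h1
    exact ⟨m2, le_trans hm1 hm2, h2⟩

theorem bfold_self (l : List (Int × Int)) (cm : PySem.Dict Int Int) (jv : Int × Int)
    (h : jv ∈ l) :
    ∃ m, (l.foldl bColStep cm).get? jv.1 = some m ∧ jv.2 ≤ m := by
  induction l generalizing cm with
  | nil => cases h
  | cons hd t ih =>
    rcases List.mem_cons.mp h with rfl | hmem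
    · obtain ⟨m, hm, hle⟩ := bstep_self cm jv
      obtain ⟨m', hm', h'⟩ := bfold_persist t (bColStep cm jv) jv.1 m hm
      exact ⟨m', h', le_trans hle hm'⟩
    · exact ih (bColStep cm hd) hmem

theorem bfold_source (l : List (Int × Int)) (cm : PySem.Dict Int Int) (k m : Int)
    (h : (l.foldl bColStep cm).get? k = some m) :
    cm.get? k = some m ∨ ∃ jv ∈ l, jv.1 = k ∧ jv.2 = m := by
  induction l generalizing cm with
  | nil => exact Or.inl h
  | cons hd t ih =>
    rcases ih (bColStep cm hd) h with h1 | ⟨jv, hjv, he⟩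
    · rcases bstep_source cm hd k m h1 with h2 | ⟨rfl, rfl⟩
      · exact Or.inl h2
      · exact Or.inr ⟨hd, List.mem_cons_self, rfl, rfl⟩
    · exact Or.inr ⟨jv, List.mem_cons_of_mem hd hjv, he⟩

theorem brows_persist (rows : List (List Int)) (C : Int) (cm : PySem.Dict Int Int) (k m : Int)
    (h : cm.get? k = some m) :
    ∃ m', m ≤ m' ∧ ((rows.foldl (fun cm r =>
      (PySem.List.enumerate (PySem.List.slice r none (some C)) 0).foldl bColStep cm) cm).get? k = some m') := by
  induction rows generalizing cm m with
  | nil => exact ⟨m, le_refl m, h⟩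
  | cons r t ih =>
    obtain ⟨m1, hm1, h1⟩ := bfold_persist _ cm k m h
    obtain ⟨m2, hm2, h2⟩ := ih _ m1 h1
    exact ⟨m2, le_trans hm1 hm2, h2⟩

theorem brows_self (rows : List (List Int)) (C : Int) (cm : PySem.Dict Int Int)
    (r : List Int) (jv : Int × Int) (hr : r ∈ rows)
    (hjv : jv ∈ PySem.List.enumerate (PySem.List.slice r none (some C)) 0) :
    ∃ m, ((rows.foldl (fun cm r =>
      (PySem.List.enumerate (PySem.List.slice r none (some C)) 0).foldl bColStep cm) cm).get? jv.1 = some m) ∧ jv.2 ≤ m := by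
  induction rows generalizing cm with
  | nil => cases hr
  | cons hd t ih =>
    rcases List.mem_cons.mp hr with rfl | hmem
    · obtain ⟨m, hm, hle⟩ := bfold_self _ cm jv hjv
      obtain ⟨m', hm', h'⟩ := brows_persist t C _ jv.1 m hm
      exact ⟨m', h', le_trans hle hm'⟩
    · exact ih _ hmem

theorem brows_source (rows : List (List Int)) (C : Int) (cm : PySem.Dict Int Int) (k m : Int)
    (h : (rows.foldl (fun cm r =>
      (PySem.List.enumerate (PySem.List.slice r none (some C)) 0).foldl bColStep cm) cm).get? k = some m) :
    cm.get? k = some m ∨ ∃ r ∈ rows, ∃ jv ∈ PySem.List.enumerate (PySem.List.slice r none (some C)) 0,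
      jv.1 = k ∧ jv.2 = m := by
  induction rows generalizing cm with
  | nil => exact Or.inl h
  | cons hd t ih =>
    rcases ih _ h with h1 | ⟨r, hrt, hrest⟩
    · rcases bfold_source _ cm k m h1 with h2 | ⟨jv, hjv, he⟩
      · exact Or.inl h2
      · exact Or.inr ⟨hd, List.mem_cons_self, jv, hjv, he⟩
    · exact Or.inr ⟨r, List.mem_cons_of_mem hd hrt, hrest⟩

theorem colmax_lt_iff (rows : List (List Int)) (C : Int) (j : Int) (v : Int)
    (hkey : ∃ r ∈ rows, ∃ jv ∈ PySem.List.enumerate (PySem.List.slice r none (some C)) 0, jv.1 = j) :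
    (v < (bBuildCol rows C).getD j 0) ↔
      ∃ r ∈ rows, ∃ jv ∈ PySem.List.enumerate (PySem.List.slice r none (some C)) 0,
        jv.1 = j ∧ v < jv.2 := by
  obtain ⟨r0, hr0, jv0, hjv0, hj0⟩ := hkey
  obtain ⟨m, hm, _⟩ := brows_self rows C PySem.Dict.empty r0 jv0 hr0 hjv0
  rw [hj0] at hm
  have hget : (bBuildCol rows C).getD j 0 = m := PySem.Dict.getD_of_get?_eq_some _ 0 hm
  rw [hget]
  constructor
  · intro hv
    rcases brows_source rows C PySem.Dict.empty j m hm with h | ⟨r, hr, jv, hjv, hj, hmv⟩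
    · rw [PySem.Dict.get?_empty] at h; cases h
    · exact ⟨r, hr, jv, hjv, hj, by omega⟩
  · rintro ⟨r, hr, jv, hjv, hj, hv⟩
    obtain ⟨m', hm', hle⟩ := brows_self rows C PySem.Dict.empty r jv hr hjv
    rw [hj, hm] at hm'
    have : m' = m := (Option.some.injEq _ _).mp hm'.symm
    omega

-- ===== characterizations of the two scan conditions =====

-- A's double loop fires iff some cell value is exceeded in its row and in its column (getD view)
theorem Aany_iff (ld : List Int) (lh : List (List Int)) (R C : Int)
    (hld0 : PySem.List.pyGetD ld 0 0 = R) (hld1 : PySem.List.pyGetD ld 1 0 = C) :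
    ((PySem.List.pyRange 0 (PySem.List.pyGetD ld 0 0) 1).any (fun row =>
      (PySem.List.pyRange 0 (PySem.List.pyGetD ld 1 0) 1).any (fun col =>
        (! CheckRowA row lh (PySem.List.pyGetD (PySem.List.pyGetD lh row []) col 0)) &&
        (! CheckColA col lh ld (PySem.List.pyGetD (PySem.List.pyGetD lh row []) col 0)))) = true) ↔
      ∃ i < R.toNat, ∃ j < C.toNat,
        (∃ s ∈ lawnRow lh i, lawnVal lh i j < s) ∧
        ∃ r < R.toNat, lawnVal lh i j < lawnVal lh r j := by
  rw [hld0, hld1]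
  simp only [List.any_eq_true, PySem.List.mem_pyRange_one]
  constructor
  · rintro ⟨i, ⟨hi0, hiR⟩, j, ⟨hj0, hjC⟩, hand⟩
    rw [Bool.and_eq_true] at hand
    have hicast : ((i.toNat : Int)) = i := by omega
    have hjcast : ((j.toNat : Int)) = j := by omega
    rw [← hicast, ← hjcast, pyVal_cast] at hand
    refine ⟨i.toNat, by omega, j.toNat, by omega, ?_, ?_⟩
    · exact (notRow_iff lh i.toNat j.toNat).mp hand.1
    · exact (notCol_iff lh ld R j.toNat _ hld0).mp hand.2
  · rintro ⟨i, hi, j, hj, hrow, hcol⟩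
    refine ⟨(i : Int), ⟨by omega, by omega⟩, (j : Int), ⟨by omega, by omega⟩, ?_⟩
    rw [Bool.and_eq_true, pyVal_cast]
    exact ⟨(notRow_iff lh i j).mpr hrow, (notCol_iff lh ld R j _ hld0).mpr hcol⟩

-- B's check loop fires iff some existing cell value is exceeded in its row and in its column
theorem Bany_iff (lh : List (List Int)) (R C : Int) (hR : 0 < R) (hC : 0 < C) :
    (((PySem.List.slice lh none (some R)).any (fun r =>
        (! r.isEmpty) &&
        (let mi := (PySem.List.max? r (fun y => y)).getD 0
         (PySem.List.enumerate (PySem.List.slice r none (some C)) 0).any (fun jv =>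
           decide (jv.2 < mi) &&
           decide (jv.2 < (bBuildCol (PySem.List.slice lh none (some R)) C).getD jv.1 0))))) = true) ↔
      ∃ i < min R.toNat lh.length, ∃ j, j < (lawnRow lh i).length ∧ (j : Int) < C ∧
        (∃ s ∈ lawnRow lh i, lawnVal lh i j < s) ∧
        ∃ r < min R.toNat lh.length, j < (lawnRow lh r).length ∧ lawnVal lh i j < lawnVal lh r j := by
  have hR0 : (0:Int) ≤ R := le_of_lt hR
  have hC0 : (0:Int) ≤ C := le_of_lt hC
  simp only [List.any_eq_true, Bool.and_eq_true, Bool.not_eq_true', List.isEmpty_eq_false_iff,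
    decide_eq_true_eq]
  constructor
  · rintro ⟨r, hr, hne, jv, hjv, hmi, hcm⟩
    obtain ⟨i, hi, hri⟩ := (mem_rows lh R hR0 r).mp hr
    obtain ⟨k, hk1, hk2, rfl⟩ := (mem_enum_slice r C hC0 jv).mp hjv
    have hval : r.getD k 0 = lawnVal lh i k := by rw [← hri]; rfl
    have hrow : ∃ s ∈ lawnRow lh i, lawnVal lh i k < s := by
      rw [hri, ← hval]
      exact (maxD_lt_iff r hne _).mp hmi
    have hcol := (colmax_lt_iff (PySem.List.slice lh none (some R)) C ((k : Nat) : Int) _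
      ⟨r, hr, _, hjv, rfl⟩).mp hcm
    obtain ⟨r', hr', jv', hjv', hj', hv'⟩ := hcol
    obtain ⟨i', hi', hri'⟩ := (mem_rows lh R hR0 r').mp hr'
    obtain ⟨k', hk1', hk2', rfl⟩ := (mem_enum_slice r' C hC0 jv').mp hjv'
    have hj'' : ((k' : Nat) : Int) = ((k : Nat) : Int) := hj'
    have hkk : k' = k := by exact_mod_cast hj''
    subst hkk
    have hval' : r'.getD k' 0 = lawnVal lh i' k' := by rw [← hri']; rfl
    refine ⟨i, hi, k', ?_, hk2, ?_, i', hi', ?_, ?_⟩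
    · rw [hri]; exact hk1
    · exact hrow
    · rw [hri']; exact hk1'
    · rw [← hval, ← hval']; exact hv'
  · rintro ⟨i, hi, j, hj1, hj2, hrow, r', hr', hjr', hv⟩
    refine ⟨lawnRow lh i, (mem_rows lh R hR0 _).mpr ⟨i, hi, rfl⟩,
      List.ne_nil_of_length_pos (by omega), ((j : Int), (lawnRow lh i).getD j 0),
      (mem_enum_slice _ C hC0 _).mpr ⟨j, hj1, hj2, rfl⟩, ?_, ?_⟩
    · exact (maxD_lt_iff _ (List.ne_nil_of_length_pos (by omega)) _).mpr hrow
    · refine (colmax_lt_iff (PySem.List.slice lh none (some R)) C ((j : Nat) : Int) _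
        ⟨lawnRow lh i, (mem_rows lh R hR0 _).mpr ⟨i, hi, rfl⟩, _,
          (mem_enum_slice _ C hC0 _).mpr ⟨j, hj1, hj2, rfl⟩, rfl⟩).mpr ?_
      exact ⟨lawnRow lh r', (mem_rows lh R hR0 _).mpr ⟨r', hr', rfl⟩,
        ((j : Int), (lawnRow lh r').getD j 0),
        (mem_enum_slice _ C hC0 _).mpr ⟨j, hjr', hj2, rfl⟩, rfl, hv⟩

theorem okB_iff (lh : List (List Int)) (i j : Nat) :
    lawnOkB lh i j = true ↔ i < lh.length ∧ j < (lawnRow lh i).length := by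
  simp [lawnOkB]

theorem cfB_elim (lh : List (List Int)) (R : Int) (i j : Nat)
    (h : lawnCFB R lh i j = true) :
    ∃ r < R.toNat, (r < lh.length ∧ j < (lawnRow lh r).length) ∧
      lawnVal lh i j < lawnVal lh r j := by
  simp only [lawnCFB, List.any_eq_true, List.mem_range, Bool.and_eq_true,
    decide_eq_true_eq] at h
  obtain ⟨r, hr, ⟨-, hok⟩, hlt⟩ := h
  exact ⟨r, by omega, (okB_iff lh r j).mp hok, hlt⟩

-- the Pre_ predicate, applied at one raising cell, yields a "NO" cell not after it
theorem areturnsB_elim (lh : List (List Int)) (R C : Int)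
    (hAR : lawnAReturnsB R C lh = true) (i j : Nat)
    (hi : i < min R.toNat (lh.length + 1))
    (hj : j < min C.toNat ((lawnRow lh i).length + 1))
    (hraise : lawnRaiseB R lh i j = true) :
    ∃ i' < i + 1, ∃ j' < min C.toNat ((lawnRow lh i').length), lawnNoB R lh i' j' = true := by
  simp only [lawnAReturnsB, List.all_eq_true, List.mem_range] at hAR
  have h := hAR i hi j hj
  rw [hraise] at h
  simp only [Bool.not_true, Bool.false_or, List.any_eq_true, List.mem_range,
    Bool.and_eq_true] at h
  obtain ⟨i', hi', j', hj', -, hno⟩ := h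
  exact ⟨i', hi', j', hj', hno⟩

-- from the Pre_ scan predicate: if the grid is not a full R×C grid, A's scan reaches a "NO" cell
theorem exists_no_of_not_full (lh : List (List Int)) (R C : Int)
    (hAR : lawnAReturnsB R C lh = true) (hR : 0 < R) (hC : 0 < C)
    (hnf : ¬ (R ≤ (lh.length : Int) ∧ ∀ i < R.toNat, C ≤ ((lawnRow lh i).length : Int))) :
    ∃ i < R.toNat, ∃ j < C.toNat, j < (lawnRow lh i).length ∧ lawnNoB R lh i j = true := by
  have main : ∃ i < min R.toNat (lh.length + 1), ∃ j < min C.toNat ((lawnRow lh i).length + 1),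
      lawnRaiseB R lh i j = true := by
    by_cases hlen : R ≤ (lh.length : Int)
    · have hs : ∃ i < R.toNat, ((lawnRow lh i).length : Int) < C := by
        by_contra hcon
        push Not at hcon
        exact hnf ⟨hlen, fun i hi => hcon i hi⟩
      obtain ⟨i, hi, hshort⟩ := hs
      refine ⟨i, by omega, (lawnRow lh i).length, by omega, ?_⟩
      have hok : lawnOkB lh i (lawnRow lh i).length = false := by
        simp [lawnOkB]
      simp [lawnRaiseB, hok]
    · refine ⟨lh.length, by omega, 0, ?_, ?_⟩
      · omega
      · have hok : lawnOkB lh lh.length 0 = false := by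
          simp [lawnOkB]
        simp [lawnRaiseB, hok]
  obtain ⟨i, hi, j, hj, hraise⟩ := main
  obtain ⟨i', hi', j', hj', hno⟩ := areturnsB_elim lh R C hAR i j hi hj hraise
  exact ⟨i', by omega, j', by omega, by omega, hno⟩

-- a "NO" cell makes both scans fire
theorem no_gives_Q (lh : List (List Int)) (R : Int) (i j : Nat)
    (hno : lawnNoB R lh i j = true) :
    (∃ s ∈ lawnRow lh i, lawnVal lh i j < s) ∧
    ∃ r < R.toNat, lawnVal lh i j < lawnVal lh r j := by
  simp only [lawnNoB, Bool.and_eq_true] at hno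
  obtain ⟨⟨-, hrf⟩, hcf⟩ := hno
  obtain ⟨r, hr, -, hlt⟩ := cfB_elim lh R i j hcf
  constructor
  · simpa [lawnRFB] using hrf
  · exact ⟨r, hr, hlt⟩

theorem no_gives_P (lh : List (List Int)) (R : Int) (i j : Nat)
    (hno : lawnNoB R lh i j = true) (hiR : i < R.toNat) :
    i < min R.toNat lh.length ∧ j < (lawnRow lh i).length ∧
    (∃ s ∈ lawnRow lh i, lawnVal lh i j < s) ∧
    ∃ r < min R.toNat lh.length, j < (lawnRow lh r).length ∧ lawnVal lh i j < lawnVal lh r j := by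
  simp only [lawnNoB, Bool.and_eq_true] at hno
  obtain ⟨⟨hok, hrf⟩, hcf⟩ := hno
  obtain ⟨hiL, hjr⟩ := (okB_iff lh i j).mp hok
  obtain ⟨r, hr, ⟨hrL, hjr'⟩, hlt⟩ := cfB_elim lh R i j hcf
  refine ⟨by omega, hjr, ?_, r, by omega, hjr', hlt⟩
  simpa [lawnRFB] using hrf

-- ===== VERDICT (by name: the statement is the Claim_ definition above) =====
theorem solveLawn_spec : Claim_equal_solveLawn := by
  intro ld lh _ hpre
  show solveLawn ld lh = solveLawn_alt ld lh
  by_cases hmem : (1 : Int) ∈ ld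
  · simp [solveLawn, solveLawn_alt, hmem]
  by_cases hR : PySem.List.pyGetD ld 0 0 ≤ 0
  · simp [solveLawn, solveLawn_alt, hmem, hR, PySem.List.pyRange_one_eq_nil hR]
  by_cases hC : PySem.List.pyGetD ld 1 0 ≤ 0
  · simp [solveLawn, solveLawn_alt, hmem, hR, hC, PySem.List.pyRange_one_eq_nil hC]
  rw [not_le] at hR hC
  have hAR : lawnAReturnsB (PySem.List.pyGetD ld 0 0) (PySem.List.pyGetD ld 1 0) lh = true := by
    rcases hpre with h | ⟨-, h⟩
    · exact absurd h hmem
    rcases h with h | ⟨-, h⟩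
    · omega
    rcases h with h | h
    · omega
    · exact h
  set R := PySem.List.pyGetD ld 0 0 with hRdef
  set C := PySem.List.pyGetD ld 1 0 with hCdef
  have key : ((PySem.List.pyRange 0 (PySem.List.pyGetD ld 0 0) 1).any (fun row =>
      (PySem.List.pyRange 0 (PySem.List.pyGetD ld 1 0) 1).any (fun col =>
        (! CheckRowA row lh (PySem.List.pyGetD (PySem.List.pyGetD lh row []) col 0)) &&
        (! CheckColA col lh ld (PySem.List.pyGetD (PySem.List.pyGetD lh row []) col 0))))) =
      ((PySem.List.slice lh none (some R)).any (fun r =>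
        (! r.isEmpty) &&
        (let mi := (PySem.List.max? r (fun y => y)).getD 0
         (PySem.List.enumerate (PySem.List.slice r none (some C)) 0).any (fun jv =>
           decide (jv.2 < mi) &&
           decide (jv.2 < (bBuildCol (PySem.List.slice lh none (some R)) C).getD jv.1 0))))) := by
    rw [Bool.eq_iff_iff, Aany_iff ld lh R C hRdef.symm hCdef.symm, Bany_iff lh R C hR hC]
    by_cases hfull : R ≤ (lh.length : Int) ∧ ∀ i < R.toNat, C ≤ ((lawnRow lh i).length : Int)
    · -- full grid: the two existence statements coincide cell by cell
      obtain ⟨hlen, hrows⟩ := hfull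
      constructor
      · rintro ⟨i, hi, j, hj, hrow, r, hr, hcol⟩
        have hiL : i < lh.length := by omega
        have hrL : r < lh.length := by omega
        refine ⟨i, by omega, j, ?_, by omega, hrow, r, by omega, ?_, hcol⟩
        · have := hrows i hi; omega
        · have := hrows r hr; omega
      · rintro ⟨i, hi, j, hj1, hj2, hrow, r, hr, hrj, hcol⟩
        exact ⟨i, by omega, j, by omega, hrow, r, by omega, hcol⟩
    · -- ragged grid: Pre_ guarantees a "NO" cell; both sides hold
      obtain ⟨i, hi, j, hjC, hjr, hno⟩ := exists_no_of_not_full lh R C hAR hR hC hfull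
      obtain ⟨hrow, r, hr, hcol⟩ := no_gives_Q lh R i j hno
      obtain ⟨hi', hj', hrow', hcolP⟩ := no_gives_P lh R i j hno hi
      constructor
      · intro _; exact ⟨i, hi', j, hj', by omega, hrow', hcolP⟩
      · intro _; exact ⟨i, hi, j, hjC, hrow, r, hr, hcol⟩
  simp only [solveLawn, solveLawn_alt, if_neg hmem, ← hRdef, ← hCdef,
    if_neg (by omega : ¬ R ≤ 0), if_neg (by omega : ¬ C ≤ 0)]
  rw [key]
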